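-- pv_equiv track=rewrite | github.com/Ypz22/Universidad | TercerSemestre/Segundo Parcial/Modelos discretos/P3_D1_NRC14545_Yepez_Jefferson/P3_D2_NRC14546_Parra_Sebastian/P3_D2_NRC14546_Parra_Sebastian/P3_D2_NRC14546_Parra_Sebastian_No_1.py | encontrarHermanos
-- ===== SOURCE A (Python) =====
-- def encontrarHermanos(nodo1,edges, hermanos = None):
--     if hermanos is None:
--         hermanos = []
--
--     padre = None
--     for arista in edges:
--         padre_tempr, hijo = arista
--         if hijo == nodo1:
--             padre = padre_tempr
--
--     if padre is not None:
--         for arista in edges: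
--             padre_tempr, hijo = arista
--             if padre_tempr == padre and hijo != nodo1:
--                 hermanos.append(hijo)
--
--     return hermanos
-- ===== SOURCE B (Python) =====
-- def encontrarHermanos(nodo1, edges, hermanos=None):
--     # B: build both indexes in one pass over edges, then answer by direct lookup.
--     if hermanos is None:
--         hermanos = []
--     child_to_parent = {}
--     parent_to_children = {}
--     for p, h in edges:
--         child_to_parent[h] = p            # last edge wins, like A's scan
--         parent_to_children.setdefault(p, []).append(h)
--     padre = child_to_parent.get(nodo1)
--     if padre is not None:
--         for h in parent_to_children.get(padre, []):
--             if h != nodo1: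
--                 hermanos.append(h)
--     return hermanos
-- ===== Notes on version B (the rewrite author's own statement) =====
-- stated objective: alternative
-- what changed: B replaces A's two full scans of the edge list (one to find the last parent of nodo1, one to collect that parent's other children) by a single indexing pass that builds child_to_parent and parent_to_children dictionaries, then answers with two direct lookups.
import Mathlib
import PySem

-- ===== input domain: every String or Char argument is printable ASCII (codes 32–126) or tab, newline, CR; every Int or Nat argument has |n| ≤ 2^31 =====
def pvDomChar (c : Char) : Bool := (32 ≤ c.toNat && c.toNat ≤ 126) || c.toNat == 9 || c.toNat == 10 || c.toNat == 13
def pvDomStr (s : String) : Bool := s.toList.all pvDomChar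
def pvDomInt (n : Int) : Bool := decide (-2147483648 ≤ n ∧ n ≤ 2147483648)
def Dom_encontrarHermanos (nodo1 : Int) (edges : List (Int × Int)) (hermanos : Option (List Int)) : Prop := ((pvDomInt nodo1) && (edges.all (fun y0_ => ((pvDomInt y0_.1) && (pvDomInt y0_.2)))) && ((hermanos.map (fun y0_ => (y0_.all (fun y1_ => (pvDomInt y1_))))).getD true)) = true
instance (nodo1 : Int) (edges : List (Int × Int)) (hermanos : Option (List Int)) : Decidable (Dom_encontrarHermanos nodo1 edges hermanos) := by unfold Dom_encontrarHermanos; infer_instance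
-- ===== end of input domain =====

-- B builds child→parent and parent→children indexes in one pass instead of A's two full edge scans; return-value equivalence only (both Pythons also append to a caller-supplied hermanos list in place).
-- ===== PORT A =====
def encontrarHermanos (nodo1 : Int) (edges : List (Int × Int)) (hermanos : Option (List Int)) : List Int :=
  let hermanos := hermanos.getD []
  let padre : Option Int := edges.foldl (fun padre arista =>
      if arista.2 == nodo1 then some arista.1 else padre) none
  match padre with
  | none => hermanos
  | some p =>
      edges.foldl (fun hermanos arista =>
        if arista.1 == p && !(arista.2 == nodo1) then hermanos ++ [arista.2] else hermanos) hermanos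

-- ===== PORT B =====
def encontrarHermanos_alt (nodo1 : Int) (edges : List (Int × Int)) (hermanos : Option (List Int)) : List Int :=
  let hermanos := hermanos.getD []
  let maps : PySem.Dict Int Int × PySem.Dict Int (List Int) :=
    edges.foldl (fun m a => (m.1.insert a.2 a.1, m.2.modify a.1 [] (· ++ [a.2])))
      (PySem.Dict.empty, PySem.Dict.empty)
  match maps.1.get? nodo1 with
  | none => hermanos
  | some padre =>
      (maps.2.getD padre []).foldl (fun hermanos h =>
        if !(h == nodo1) then hermanos ++ [h] else hermanos) hermanos

-- ===== PRECONDITION & SPEC =====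
def Spec_encontrarHermanos (nodo1 : Int) (edges : List (Int × Int)) (hermanos : Option (List Int)) (out : List Int) : Prop := out = encontrarHermanos_alt nodo1 edges hermanos
instance (nodo1 : Int) (edges : List (Int × Int)) (hermanos : Option (List Int)) (out : List Int) : Decidable (Spec_encontrarHermanos nodo1 edges hermanos out) := by unfold Spec_encontrarHermanos; infer_instance

-- ===== CLAIM (what is proved, stated in full; the proofs are below) =====
def Claim_equal_encontrarHermanos : Prop := ∀ (nodo1 : Int) (edges : List (Int × Int)) (hermanos : Option (List Int)), Dom_encontrarHermanos nodo1 edges hermanos → Spec_encontrarHermanos nodo1 edges hermanos (encontrarHermanos nodo1 edges hermanos)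

-- ===== LEMMAS AND PROOFS =====

-- get? after the insert-fold = A's last-wins scan for the parent of k
lemma get?_foldl_insert_snd (edges : List (Int × Int)) (d : PySem.Dict Int Int) (k : Int) :
    (edges.foldl (fun d a => d.insert a.2 a.1) d).get? k
      = edges.foldl (fun p a => if a.2 == k then some a.1 else p) (d.get? k) := by
  induction edges generalizing d with
  | nil => rfl
  | cons a l ih =>
      simp only [List.foldl_cons, ih, PySem.Dict.get?_insert]
      congr 1
      by_cases h : a.2 = k
      · subst h; simp
      · simp [h, Ne.symm h]

-- ===== VERDICT (by name: the statement is the Claim_ definition above) =====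
theorem encontrarHermanos_spec : Claim_equal_encontrarHermanos := by
  intro nodo1 edges hermanos _
  unfold Spec_encontrarHermanos encontrarHermanos encontrarHermanos_alt
  rw [PySem.List.foldl_prod_mk (fun (d : PySem.Dict Int Int) (a : Int × Int) => d.insert a.2 a.1)
        (fun (d : PySem.Dict Int (List Int)) (a : Int × Int) => d.modify a.1 [] (· ++ [a.2]))]
  dsimp only
  rw [get?_foldl_insert_snd]
  simp only [PySem.Dict.get?_empty]
  cases h : edges.foldl (fun p a => if a.2 == nodo1 then some a.1 else p) none with
  | none => rfl
  | some p =>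
      dsimp only
      rw [PySem.Dict.getD_foldl_modify_append, PySem.List.foldl_append_if,
          PySem.List.foldl_append_if]
      simp only [PySem.Dict.getD_empty, List.nil_append, List.filter_map,
        List.filter_filter, List.map_map, Function.comp]
      congr 1
      apply congrArg
      apply List.filter_congr
      intro a _
      simp [Bool.and_comm]
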